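-- pv_equiv track=rewrite | github.com/toutane/codewars-kata | python/5kyu/consecutive-k-primes.py | count_Kprimes
-- ===== SOURCE A (Python) =====
-- def count_Kprimes(k, start, end):
--     res = []
--     if start == 0:
--         start += 1
--     for n in range(start, end + 1):
--         fac = 0
--         t = n
--         while t % 2 == 0:
--             t = t // 2
--             fac += 1
--         i = 3
--         while (i * i) <= n:
--             while t % i == 0:
--                 t = t // i
--                 fac += 1
--             i += 2
--         if n % t == 0 and t != 1:
--             fac += 1
--         if fac == k:
--             res.append(n)
--     return res
-- ===== SOURCE B (Python) =====
-- def count_Kprimes(k, start, end):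
--     lo = max(start, 1)
--     if lo > end:
--         return []
--     spf = [0] * (end + 1)
--     for i in range(2, end + 1):
--         if spf[i] == 0:
--             for j in range(i, end + 1, i):
--                 if spf[j] == 0:
--                     spf[j] = i
--     res = []
--     for n in range(lo, end + 1):
--         t = n
--         fac = 0
--         while t > 1:
--             t //= spf[t]
--             fac += 1
--         if fac == k:
--             res.append(n)
--     return res
-- ===== Notes on version B (the rewrite author's own statement) =====
-- stated objective: alternative
-- what changed: Instead of trial-dividing every n in the range by 2 and all odd i up to sqrt(n), B builds one smallest-prime-factor sieve over [0, end] and counts each n's prime factors (with multiplicity) by repeatedly dividing by spf[t]; a different algorithm of similar overall cost (it depends on end rather than on the range width times sqrt(end)).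
-- outside the precondition, e.g. on count_Kprimes(2, -10, -5): A returns [-10, -6], B returns []
import Mathlib
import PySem

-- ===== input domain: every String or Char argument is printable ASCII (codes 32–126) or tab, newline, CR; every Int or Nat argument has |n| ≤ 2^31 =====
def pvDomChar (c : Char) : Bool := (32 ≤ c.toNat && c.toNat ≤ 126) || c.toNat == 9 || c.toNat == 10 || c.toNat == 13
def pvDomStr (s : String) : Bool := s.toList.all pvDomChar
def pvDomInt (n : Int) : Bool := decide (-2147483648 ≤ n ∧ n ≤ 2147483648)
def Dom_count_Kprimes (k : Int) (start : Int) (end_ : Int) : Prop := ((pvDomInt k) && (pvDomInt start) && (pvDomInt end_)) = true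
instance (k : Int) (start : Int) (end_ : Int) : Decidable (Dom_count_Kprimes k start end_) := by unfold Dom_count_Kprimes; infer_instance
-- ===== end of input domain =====

-- B replaces A's per-number trial division (by 2 and all odd i up to sqrt(n)) with one
-- smallest-prime-factor sieve over [0, end] and a division-by-spf count per number
-- (objective: an alternative algorithm of similar overall cost).

-- ===== PORT A =====
-- 'while t % p == 0: t = t // p; fac += 1'  (fuel only makes the loop total in Lean; it is
-- never exhausted on the inputs the claim covers)
def pvStripA (p : Int) : Nat → Int × Int → Int × Int
  | 0, st => st
  | fuel + 1, (t, fac) =>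
    if PySem.Int.mod t p = 0 then pvStripA p fuel (PySem.Int.floordiv t p, fac + 1)
    else (t, fac)

-- 'i = 3; while i * i <= n: <strip i>; i += 2'  (fuel likewise never exhausted)
def pvOddA (n : Int) : Nat → Int → Int × Int → Int × Int
  | 0, _, st => st
  | fuel + 1, i, st =>
    if i * i ≤ n then pvOddA n fuel (i + 2) (pvStripA i (st.1.natAbs + 1) st)
    else st

-- the per-n body of A's main loop: the value 'fac' holds at the final test
def pvFacA (n : Int) : Int :=
  let s1 := pvStripA 2 (n.natAbs + 1) (n, 0)
  let s2 := pvOddA n (n.natAbs + 1) 3 s1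
  if PySem.Int.mod n s2.1 = 0 ∧ s2.1 ≠ 1 then s2.2 + 1 else s2.2

def count_Kprimes (k : Int) (start : Int) (end_ : Int) : List Int :=
  let start' := if start = 0 then start + 1 else start
  (PySem.List.pyRange start' (end_ + 1) 1).foldl
    (fun res n => if pvFacA n = k then res ++ [n] else res) []

-- ===== PORT B =====
-- 'for j in range(i, end+1, i): if spf[j] == 0: spf[j] = i'
def pvMarkB (i : Int) (end_ : Int) (spf : List Int) : List Int :=
  (PySem.List.pyRange i (end_ + 1) i).foldl
    (fun s j => if PySem.List.pyGetD s j 0 = 0 then PySem.List.pySetD s j i else s) spf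

-- 'spf = [0]*(end+1); for i in range(2, end+1): if spf[i] == 0: <mark multiples of i>'
def pvSieveB (end_ : Int) : List Int :=
  (PySem.List.pyRange 2 (end_ + 1) 1).foldl
    (fun s i => if PySem.List.pyGetD s i 0 = 0 then pvMarkB i end_ s else s)
    (List.replicate (end_ + 1).toNat 0)

-- 'while t > 1: t //= spf[t]; fac += 1'  (fuel never exhausted on covered inputs)
def pvCountB (spf : List Int) : Nat → Int → Int → Int
  | 0, _, fac => fac
  | fuel + 1, t, fac =>
    if 1 < t then pvCountB spf fuel (PySem.Int.floordiv t (PySem.List.pyGetD spf t 0)) (fac + 1)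
    else fac

def count_Kprimes_alt (k : Int) (start : Int) (end_ : Int) : List Int :=
  let lo := max start 1
  if end_ < lo then []
  else
    let spf := pvSieveB end_
    (PySem.List.pyRange lo (end_ + 1) 1).foldl
      (fun res n => if pvCountB spf n.natAbs n 0 = k then res ++ [n] else res) []

-- ===== PRECONDITION & SPEC =====
-- Pre_ excludes negative start: there with end >= 0 the Python A never returns (its first factor
-- loop runs forever at n = 0), and with end < 0 the corner is one nobody specifies — how many
-- "prime factors" a NEGATIVE integer has — where A's floor-mod division count and B's count of
-- none are both accidental free choices; on every range of positive numbers the two agree.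
def Pre_count_Kprimes (k : Int) (start : Int) (end_ : Int) : Prop := 0 ≤ start
instance (k : Int) (start : Int) (end_ : Int) : Decidable (Pre_count_Kprimes k start end_) := by
  unfold Pre_count_Kprimes; infer_instance

def pvWitness_count_Kprimes : Int × Int × Int := (2, 0, 30)

def Spec_count_Kprimes (k : Int) (start : Int) (end_ : Int) (out : List Int) : Prop := out = count_Kprimes_alt k start end_
instance (k : Int) (start : Int) (end_ : Int) (out : List Int) : Decidable (Spec_count_Kprimes k start end_ out) := by unfold Spec_count_Kprimes; infer_instance

-- ===== CLAIM (what is proved, stated in full; the proofs are below) =====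
def Claim_equal_count_Kprimes : Prop := ∀ (k : Int) (start : Int) (end_ : Int), Dom_count_Kprimes k start end_ → Pre_count_Kprimes k start end_ → Spec_count_Kprimes k start end_ (count_Kprimes k start end_)

-- ===== LEMMAS AND PROOFS =====

def pvOmega (t : Int) : Int := ((t.natAbs).primeFactorsList.length : Int)

theorem pvOmega_one : pvOmega 1 = 0 := by simp [pvOmega]

-- Ω(p·s) = Ω(s) + 1 for prime p  (stated on Nats)
theorem pvOmega_mul_prime (P S : ℕ) (hP : P.Prime) (hS : S ≠ 0) :
    ((P * S).primeFactorsList.length : Int) = (S.primeFactorsList.length : Int) + 1 := by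
  have h := Nat.perm_primeFactorsList_mul (a := P) (b := S) hP.ne_zero hS
  have := h.length_eq
  rw [this, List.length_append, Nat.primeFactorsList_prime hP]
  simp [add_comm]

theorem stripA_not_dvd (p t fac : Int) (fuel : Nat) (h : ¬ p ∣ t) :
    pvStripA p (fuel + 1) (t, fac) = (t, fac) := by
  simp [pvStripA, PySem.Int.mod_eq_zero_iff_dvd, h]

theorem stripA_prime (p : Int) (hp : 2 ≤ p) (hpp : (p.natAbs).Prime) :
    ∀ (fuel : Nat) (t fac : Int), 1 ≤ t → t.natAbs ≤ fuel →
    ∃ t' fac', pvStripA p fuel (t, fac) = (t', fac') ∧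
      fac' + pvOmega t' = fac + pvOmega t ∧ 1 ≤ t' ∧ t' ∣ t ∧ ¬ p ∣ t' := by
  intro fuel
  induction fuel with
  | zero => intro t fac ht hf; omega
  | succ f ih =>
    intro t fac ht hf
    by_cases hdvd : p ∣ t
    · obtain ⟨s, hs⟩ := hdvd
      have hp0 : (0:Int) < p := by omega
      have hs1 : 1 ≤ s := by nlinarith
      have hfd : PySem.Int.floordiv t p = s := by
        rw [PySem.Int.floordiv_eq_ediv_of_pos hp0, hs, Int.mul_ediv_cancel_left _ (by omega)]
      have hstep : pvStripA p (f + 1) (t, fac) = pvStripA p f (s, fac + 1) := by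
        simp only [pvStripA, PySem.Int.mod_eq_zero_iff_dvd]
        rw [if_pos ⟨s, hs⟩, hfd]
      have hna : s.natAbs ≤ f := by
        have hm : t.natAbs = p.natAbs * s.natAbs := by rw [hs, Int.natAbs_mul]
        have h2 : 2 ≤ p.natAbs := by omega
        have h3 : 1 ≤ s.natAbs := by omega
        nlinarith
      obtain ⟨t', fac', heq, hfac, ht', hdvd', hnd⟩ := ih s (fac + 1) hs1 hna
      refine ⟨t', fac', by rw [hstep, heq], ?_, ht', hdvd'.trans ⟨p, by rw [hs]; ring⟩, hnd⟩
      · have hΩ : pvOmega t = pvOmega s + 1 := by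
          have hsn : s.natAbs ≠ 0 := by omega
          have : t.natAbs = p.natAbs * s.natAbs := by rw [hs, Int.natAbs_mul]
          unfold pvOmega
          rw [this]
          exact pvOmega_mul_prime _ _ hpp hsn
        omega
    · exact ⟨t, fac, stripA_not_dvd p t fac f hdvd, rfl, ht, dvd_refl t, hdvd⟩

-- a number whose prime factors all exceed its square root is 1 or prime
theorem tail_one_or_prime (T N : ℕ) (hT : 1 ≤ T) (hTN : T ≤ N)
    (h : ∀ q : ℕ, q.Prime → q ∣ T → N < q * q) : T = 1 ∨ T.Prime := by
  rcases Nat.lt_or_ge T 2 with h2 | h2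
  · left; omega
  · right
    have hp := Nat.minFac_prime (n := T) (by omega)
    have hpd := Nat.minFac_dvd T
    obtain ⟨S, hS⟩ := hpd
    by_cases hS1 : S = 1
    · rw [hS, hS1, Nat.mul_one]; exact hp
    · exfalso
      have hS0 : S ≠ 0 := by rintro rfl; omega
      have hrp := Nat.minFac_prime hS1
      have hST : S ∣ T := hS.symm ▸ dvd_mul_left S T.minFac
      have hrd : S.minFac ∣ T := (Nat.minFac_dvd S).trans hST
      have h1 := h T.minFac hp (Nat.minFac_dvd T)
      have h2' := h S.minFac hrp hrd
      have hrS : S.minFac ≤ S := Nat.minFac_le (by omega)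
      have : T.minFac * S.minFac ≤ T := by
        calc T.minFac * S.minFac ≤ T.minFac * S := by
              exact Nat.mul_le_mul_left _ hrS
          _ = T := hS.symm
      have hA : T.minFac * S.minFac ≤ N := le_trans this hTN
      nlinarith [Nat.mul_le_mul hA hA, Nat.mul_lt_mul'' h1 h2']

theorem oddA_spec (n : Int) (_hn : 1 ≤ n) :
    ∀ (fuel : Nat) (i t fac : Int), 3 ≤ i → i % 2 = 1 → 1 ≤ t → t ∣ n →
    (∀ q : ℕ, q.Prime → (q:Int) ∣ t → i ≤ (q:Int)) → (n + 1 - i).toNat ≤ fuel →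
    ∃ t' fac', pvOddA n fuel i (t, fac) = (t', fac') ∧
      fac' + pvOmega t' = fac + pvOmega t ∧ 1 ≤ t' ∧ t' ∣ n ∧
      (∀ q : ℕ, q.Prime → (q:Int) ∣ t' → n < (q:Int) * (q:Int)) := by
  intro fuel
  induction fuel with
  | zero =>
    intro i t fac hi hodd ht htn hinv hf
    refine ⟨t, fac, rfl, rfl, ht, htn, ?_⟩
    intro q hq hqd
    have hiq := hinv q hq hqd
    have : n + 1 ≤ i := by omega
    nlinarith
  | succ f ih =>
    intro i t fac hi hodd ht htn hinv hf
    by_cases hcond : i * i ≤ n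
    · have hin : i ≤ n := by nlinarith
      have hstep : pvOddA n (f + 1) i (t, fac)
          = pvOddA n f (i + 2) (pvStripA i (t.natAbs + 1) (t, fac)) := by
        simp [pvOddA, hcond]
      by_cases hit : i ∣ t
      · -- i divides t, hence i is prime
        have hiP : ((i.natAbs : ℕ) : Int) = i := Int.natAbs_of_nonneg (by omega)
        have hP1 : i.natAbs ≠ 1 := by omega
        have hq0p := Nat.minFac_prime hP1
        have hq0di : ((i.natAbs.minFac : ℕ) : Int) ∣ i := by
          rw [← hiP]; exact_mod_cast Nat.minFac_dvd i.natAbs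
        have hq0ge : i ≤ ((i.natAbs.minFac : ℕ) : Int) :=
          hinv _ hq0p (hq0di.trans hit)
        have hq0le : i.natAbs.minFac ≤ i.natAbs := Nat.minFac_le (by omega)
        have hq0eq : i.natAbs.minFac = i.natAbs := by omega
        have hPp : (i.natAbs).Prime := hq0eq ▸ hq0p
        obtain ⟨t1, fac1, heq, hfac, ht1, hd1, hnd1⟩ :=
          stripA_prime i (by omega) hPp (t.natAbs + 1) t fac ht (by omega)
        have hinv' : ∀ q : ℕ, q.Prime → (q:Int) ∣ t1 → i + 2 ≤ (q:Int) := by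
          intro q hq hqd
          have hge := hinv q hq (hqd.trans hd1)
          have hne : (q : Int) ≠ i := by
            rintro hqi; exact hnd1 (hqi ▸ hqd)
          have hq2 : q % 2 = 1 := by
            have : q ≠ 2 := by omega
            exact Nat.odd_iff.mp (hq.odd_of_ne_two this)
          omega
        obtain ⟨t', fac', heq', hfac', ht', htn', hbig⟩ :=
          ih (i + 2) t1 fac1 (by omega) (by omega) ht1 (hd1.trans htn) hinv' (by omega)
        refine ⟨t', fac', ?_, by omega, ht', htn', hbig⟩
        rw [hstep, heq, heq']
      · -- i does not divide t: the inner while loop does nothing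
        have hskip := stripA_not_dvd i t fac t.natAbs hit
        have hinv' : ∀ q : ℕ, q.Prime → (q:Int) ∣ t → i + 2 ≤ (q:Int) := by
          intro q hq hqd
          have hge := hinv q hq hqd
          have hne : (q : Int) ≠ i := by
            rintro hqi; exact hit (hqi ▸ hqd)
          have hq2 : q % 2 = 1 := by
            have : q ≠ 2 := by omega
            exact Nat.odd_iff.mp (hq.odd_of_ne_two this)
          omega
        obtain ⟨t', fac', heq', hfac', ht', htn', hbig⟩ :=
          ih (i + 2) t fac (by omega) (by omega) ht htn hinv' (by omega)
        refine ⟨t', fac', ?_, hfac', ht', htn', hbig⟩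
        rw [hstep, hskip]; exact heq'
    · refine ⟨t, fac, by simp [pvOddA, hcond], rfl, ht, htn, ?_⟩
      intro q hq hqd
      have hiq := hinv q hq hqd
      nlinarith

theorem facA_eq_omega (n : Int) (hn : 1 ≤ n) : pvFacA n = pvOmega n := by
  obtain ⟨t1, fac1, heq, hfac, ht1, hd1, hnd1⟩ :=
    stripA_prime 2 (by omega) (by norm_num) (n.natAbs + 1) n 0 hn (by omega)
  have hinv : ∀ q : ℕ, q.Prime → (q:Int) ∣ t1 → (3:Int) ≤ (q:Int) := by
    intro q hq hqd
    have h2 : q ≠ 2 := by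
      rintro rfl
      exact hnd1 (by exact_mod_cast hqd)
    have := hq.two_le
    omega
  obtain ⟨t2, fac2, heq', hfac', ht2, htn2, hbig⟩ :=
    oddA_spec n hn (n.natAbs + 1) 3 t1 fac1 (by omega) (by decide) ht1 hd1 hinv (by omega)
  have hcast2 : ((t2.natAbs : ℕ) : Int) = t2 := Int.natAbs_of_nonneg (by omega)
  have htail : t2.natAbs = 1 ∨ (t2.natAbs).Prime := by
    apply tail_one_or_prime t2.natAbs n.natAbs (by omega)
    · exact Nat.le_of_dvd (by omega) (Int.natAbs_dvd_natAbs.mpr htn2)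
    · intro q hqp hqd
      have : (q : Int) ∣ t2 := by
        rw [← hcast2]; exact_mod_cast hqd
      have h2 := hbig q hqp this
      have h3 : ((n.natAbs : ℕ) : Int) = n := Int.natAbs_of_nonneg (by omega)
      rw [← h3] at h2
      exact_mod_cast h2
  have hgoal : pvFacA n
      = if PySem.Int.mod n t2 = 0 ∧ t2 ≠ 1 then fac2 + 1 else fac2 := by
    simp only [pvFacA, heq, heq']
  rw [hgoal]
  rcases htail with h1 | hp
  · have ht21 : t2 = 1 := by omega
    rw [if_neg (by simp [ht21])]
    have h0 : pvOmega t2 = 0 := by rw [ht21]; exact pvOmega_one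
    omega
  · have ht22 : 2 ≤ t2 := by
      have := hp.two_le; omega
    have hmod : PySem.Int.mod n t2 = 0 := (PySem.Int.mod_eq_zero_iff_dvd n t2).mpr htn2
    rw [if_pos ⟨hmod, by omega⟩]
    have hΩ2 : pvOmega t2 = 1 := by
      unfold pvOmega
      rw [Nat.primeFactorsList_prime hp]
      simp
    omega

theorem pyGetD_pySetD_pt (s : List Int) (j q v : Int) (hj : 0 ≤ j) (hjl : j < (s.length : Int))
    (hq : 0 ≤ q) :
    PySem.List.pyGetD (PySem.List.pySetD s j v) q 0
      = if q = j then v else PySem.List.pyGetD s q 0 := by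
  rw [PySem.List.pySetD_of_nonneg s v hj,
      PySem.List.pyGetD_of_nonneg _ _ hq, PySem.List.pyGetD_of_nonneg _ _ hq]
  by_cases h : q = j
  · subst h
    rw [if_pos rfl]
    have hlt : q.toNat < s.length := by omega
    simp [List.getD, hlt]
  · rw [if_neg h]
    have hne : j.toNat ≠ q.toNat := by omega
    simp [List.getD, List.getElem?_set_ne hne]

theorem mark_fold_spec (v : Int) (hv : v ≠ 0) :
    ∀ (L : List Int) (s : List Int), (∀ j ∈ L, 0 ≤ j ∧ j < (s.length : Int)) →
    (L.foldl (fun s j => if PySem.List.pyGetD s j 0 = 0 then PySem.List.pySetD s j v else s) s).length = s.length ∧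
    ∀ q : Int, 0 ≤ q →
      PySem.List.pyGetD (L.foldl (fun s j => if PySem.List.pyGetD s j 0 = 0 then PySem.List.pySetD s j v else s) s) q 0
        = if q ∈ L ∧ PySem.List.pyGetD s q 0 = 0 then v else PySem.List.pyGetD s q 0 := by
  intro L
  induction L with
  | nil => intro s _; simp
  | cons j L ih =>
    intro s hb
    obtain ⟨hj0, hjl⟩ := hb j (by simp)
    set s1 := if PySem.List.pyGetD s j 0 = 0 then PySem.List.pySetD s j v else s with hs1
    have hlen1 : s1.length = s.length := by
      rw [hs1]; split_ifs <;> simp [PySem.List.length_pySetD]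
    have hb1 : ∀ x ∈ L, 0 ≤ x ∧ x < (s1.length : Int) := by
      intro x hx; rw [hlen1]; exact hb x (by simp [hx])
    obtain ⟨ihlen, ihval⟩ := ih s1 hb1
    constructor
    · simpa [hlen1] using ihlen
    · intro q hq
      have hval1 : PySem.List.pyGetD s1 q 0
          = if q = j ∧ PySem.List.pyGetD s j 0 = 0 then v else PySem.List.pyGetD s q 0 := by
        rw [hs1]
        by_cases h0 : PySem.List.pyGetD s j 0 = 0
        · rw [if_pos h0, pyGetD_pySetD_pt s j q v hj0 hjl hq]
          by_cases hqj : q = j <;> simp [hqj, h0]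
        · rw [if_neg h0]
          by_cases hqj : q = j <;> simp [hqj, h0]
      rw [List.foldl_cons, ← hs1, ihval q hq, hval1]
      by_cases hqj : q = j
      · subst hqj
        by_cases h0 : PySem.List.pyGetD s q 0 = 0 <;> simp [h0, hv]
      · by_cases hqL : q ∈ L <;> by_cases h0 : PySem.List.pyGetD s q 0 = 0 <;>
          simp [hqj, hqL, h0]

-- membership in the inner sieve range is exactly divisibility
theorem mem_mark_range (m end_ j : Int) (hm : 2 ≤ m) (hj2 : 2 ≤ j) (hjE : j ≤ end_) :
    j ∈ PySem.List.pyRange m (end_ + 1) m ↔ m ∣ j := by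
  rw [PySem.List.mem_pyRange_iff_of_pos (by omega)]
  constructor
  · rintro ⟨h1, h2, h3⟩
    have := dvd_add h3 (dvd_refl m)
    simpa using this
  · intro h
    refine ⟨Int.le_of_dvd (by omega) h, by omega, dvd_sub h (dvd_refl m)⟩

theorem sieve_inv (end_ : Int) (hE : 1 ≤ end_) :
    ∀ (d : Nat), 2 + (d : Int) ≤ end_ + 1 →
    (((PySem.List.pyRange 2 (2 + (d : Int)) 1).foldl
        (fun s i => if PySem.List.pyGetD s i 0 = 0 then pvMarkB i end_ s else s)
        (List.replicate (end_ + 1).toNat 0)).length = (end_ + 1).toNat) ∧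
    ∀ j : Int, 2 ≤ j → j ≤ end_ →
      PySem.List.pyGetD ((PySem.List.pyRange 2 (2 + (d : Int)) 1).foldl
        (fun s i => if PySem.List.pyGetD s i 0 = 0 then pvMarkB i end_ s else s)
        (List.replicate (end_ + 1).toNat 0)) j 0
      = if ((j.natAbs.minFac : ℕ) : Int) < 2 + (d : Int) then ((j.natAbs.minFac : ℕ) : Int) else 0 := by
  intro d
  induction d with
  | zero =>
    intro _
    rw [show (2 + ((0:Nat) : Int)) = 2 by norm_num, PySem.List.pyRange_one_eq_nil (by omega)]
    refine ⟨by simp, ?_⟩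
    intro j hj2 hjE
    have hmf : 2 ≤ j.natAbs.minFac := (Nat.minFac_prime (by omega)).two_le
    rw [if_neg (by omega)]
    rw [PySem.List.pyGetD_of_nonneg _ _ (by omega)]
    simp [List.getD, List.getElem?_replicate]
    split <;> simp
  | succ d ih =>
    intro hdE
    set m : Int := 2 + (d : Int) with hm
    have hm2 : 2 ≤ m := by omega
    have hmE : m ≤ end_ := by omega
    obtain ⟨ihlen, ihval⟩ := ih (by omega)
    rw [show (2 + ((d + 1 : Nat) : Int)) = m + 1 by omega,
        PySem.List.pyRange_one_succ_right (by omega), List.foldl_append]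
    set sOld := (PySem.List.pyRange 2 m 1).foldl
        (fun s i => if PySem.List.pyGetD s i 0 = 0 then pvMarkB i end_ s else s)
        (List.replicate (end_ + 1).toNat 0) with hsOld
    simp only [List.foldl_cons, List.foldl_nil]
    have hmfm2 : 2 ≤ m.natAbs.minFac := (Nat.minFac_prime (by omega)).two_le
    have hmOld := ihval m hm2 hmE
    by_cases hprime : m.natAbs.minFac = m.natAbs
    · -- m is prime: spf[m] = 0, the inner loop marks every multiple of m
      have hz : PySem.List.pyGetD sOld m 0 = 0 := by
        rw [hmOld, if_neg (by omega)]
      rw [if_pos hz]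
      have hbounds : ∀ j ∈ PySem.List.pyRange m (end_ + 1) m, 0 ≤ j ∧ j < ((sOld.length : ℕ) : Int) := by
        intro j hj
        rw [PySem.List.mem_pyRange_iff_of_pos (by omega)] at hj
        rw [ihlen]; omega
      obtain ⟨mlen, mval⟩ := mark_fold_spec m (by omega) (PySem.List.pyRange m (end_ + 1) m) sOld hbounds
      refine ⟨by rw [pvMarkB, mlen, ihlen], ?_⟩
      intro j hj2 hjE
      rw [pvMarkB, mval j (by omega)]
      simp only [mem_mark_range m end_ j hm2 hj2 hjE, ihval j hj2 hjE]
      have hFj2 : 2 ≤ j.natAbs.minFac := (Nat.minFac_prime (by omega)).two_le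
      by_cases hdvd : m ∣ j
      · have hFle : j.natAbs.minFac ≤ m.natAbs :=
          Nat.minFac_le_of_dvd (by omega) (Int.natAbs_dvd_natAbs.mpr hdvd)
        by_cases hFlt : ((j.natAbs.minFac : ℕ) : Int) < m
        · simp only [if_pos hFlt]
          rw [if_neg (by rintro ⟨_, h0⟩; omega), if_pos (by omega)]
        · simp only [if_neg hFlt]
          rw [if_pos ⟨hdvd, trivial⟩, if_pos (by omega)]
          omega
      · have hFne : ((j.natAbs.minFac : ℕ) : Int) ≠ m := by
          intro hF
          apply hdvd
          have hNat : j.natAbs.minFac = m.natAbs := by omega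
          exact Int.natAbs_dvd_natAbs.mp (hNat ▸ Nat.minFac_dvd j.natAbs)
        rw [if_neg (by rintro ⟨h, _⟩; exact hdvd h)]
        by_cases hFlt : ((j.natAbs.minFac : ℕ) : Int) < m
        · rw [if_pos hFlt, if_pos (by omega)]
        · rw [if_neg hFlt, if_neg (by omega)]
    · -- m is composite: spf[m] ≠ 0 already, skip
      have hmflt : m.natAbs.minFac < m.natAbs := by
        have := Nat.minFac_le (n := m.natAbs) (by omega)
        omega
      have hnz : ¬ PySem.List.pyGetD sOld m 0 = 0 := by
        rw [hmOld, if_pos (by omega)]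
        omega
      rw [if_neg hnz]
      refine ⟨ihlen, ?_⟩
      intro j hj2 hjE
      rw [ihval j hj2 hjE]
      have hFprime : (j.natAbs.minFac).Prime := Nat.minFac_prime (by omega)
      have hFne : ((j.natAbs.minFac : ℕ) : Int) ≠ m := by
        intro hF
        have : m.natAbs.Prime := by
          have : j.natAbs.minFac = m.natAbs := by omega
          rwa [this] at hFprime
        exact hprime this.minFac_eq
      by_cases hFlt : ((j.natAbs.minFac : ℕ) : Int) < m
      · rw [if_pos hFlt, if_pos (by omega)]
      · rw [if_neg hFlt, if_neg (by omega)]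

theorem sieve_spec (end_ : Int) (hE : 1 ≤ end_) :
    ∀ j : Int, 2 ≤ j → j ≤ end_ →
      PySem.List.pyGetD (pvSieveB end_) j 0 = ((j.natAbs.minFac : ℕ) : Int) := by
  have hc : 2 + (((end_ - 1).toNat : ℕ) : Int) = end_ + 1 := by omega
  obtain ⟨hlen, hval⟩ := sieve_inv end_ hE (end_ - 1).toNat (by omega)
  rw [hc] at hval
  intro j hj2 hjE
  rw [pvSieveB, hval j hj2 hjE, if_pos ?_]
  have h1 := Nat.minFac_le (n := j.natAbs) (by omega)
  omega

theorem countB_eq_omega (end_ : Int) (spf : List Int)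
    (hspec : ∀ j : Int, 2 ≤ j → j ≤ end_ →
      PySem.List.pyGetD spf j 0 = ((j.natAbs.minFac : ℕ) : Int)) :
    ∀ (fuel : Nat) (t fac : Int), 1 ≤ t → t ≤ end_ → t.natAbs ≤ fuel + 1 →
      pvCountB spf fuel t fac = fac + pvOmega t := by
  intro fuel
  induction fuel with
  | zero =>
    intro t fac ht _ hf
    have ht1 : t = 1 := by omega
    subst ht1
    simp [pvCountB, pvOmega_one]
  | succ f ih =>
    intro t fac ht htE hf
    by_cases h1 : 1 < t
    · have hT2 : 2 ≤ t.natAbs := by omega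
      set T := t.natAbs with hTdef
      have hc : ((T : ℕ) : Int) = t := Int.natAbs_of_nonneg (by omega)
      have hFp : (T.minFac).Prime := Nat.minFac_prime (by omega)
      have hdvd := Nat.minFac_dvd T
      have hdivlt : T / T.minFac < T := Nat.div_lt_self (by omega) hFp.one_lt
      have hdivpos : 1 ≤ T / T.minFac :=
        Nat.one_le_div_iff hFp.pos |>.mpr (Nat.minFac_le (by omega))
      have hlook : PySem.List.pyGetD spf t 0 = ((T.minFac : ℕ) : Int) :=
        hspec t (by omega) htE
      have hfd : PySem.Int.floordiv t (PySem.List.pyGetD spf t 0)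
          = ((T / T.minFac : ℕ) : Int) := by
        rw [hlook, ← hc]
        exact PySem.Int.floordiv_natCast _ _
      have hstep : pvCountB spf (f + 1) t fac
          = pvCountB spf f ((T / T.minFac : ℕ) : Int) (fac + 1) := by
        simp only [pvCountB, if_pos h1, hfd]
      have hTle : ((T : ℕ) : Int) ≤ end_ := by rw [hc]; exact htE
      rw [hstep, ih _ (fac + 1) (by exact_mod_cast hdivpos)
        (le_trans (by exact_mod_cast Nat.le_of_lt hdivlt) hTle)
        (by rw [Int.natAbs_natCast]; omega)]
      have hΩ : pvOmega t = pvOmega ((T / T.minFac : ℕ) : Int) + 1 := by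
        unfold pvOmega
        obtain ⟨u, hu⟩ : ∃ u, T = u + 2 := ⟨T - 2, by omega⟩
        rw [Int.natAbs_natCast, ← hTdef, hu, Nat.primeFactorsList_add_two]
        simp [add_comm]
      omega
    · have ht1 : t = 1 := by omega
      subst ht1
      simp [pvCountB, pvOmega_one]

theorem final_eq (k start end_ : Int) (hpre : 0 ≤ start) :
    count_Kprimes k start end_ = count_Kprimes_alt k start end_ := by
  have hlo2 : (if start = 0 then start + 1 else start) = max start 1 := by
    split_ifs <;> omega
  by_cases hend : end_ < max start 1
  · have h1 : PySem.List.pyRange (if start = 0 then start + 1 else start) (end_ + 1) 1 = [] :=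
      PySem.List.pyRange_one_eq_nil (by split_ifs <;> omega)
    have h2 : PySem.List.pyRange (max start 1) (end_ + 1) 1 = [] :=
      PySem.List.pyRange_one_eq_nil (by omega)
    simp [count_Kprimes, count_Kprimes_alt, h1, h2]
  · have hE : 1 ≤ end_ := by omega
    simp only [count_Kprimes, count_Kprimes_alt, hlo2, if_neg hend]
    apply PySem.List.foldl_congr_mem
    intro acc n hn
    rw [PySem.List.mem_pyRange_one] at hn
    have hfa := facA_eq_omega n (by omega)
    have hfb := countB_eq_omega end_ (pvSieveB end_) (sieve_spec end_ hE)
      n.natAbs n 0 (by omega) (by omega) (by omega)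
    rw [hfa, hfb]
    simp

-- ===== VERDICT (by name: the statement is the Claim_ definition above) =====
theorem count_Kprimes_spec : Claim_equal_count_Kprimes := by
  intro k start end_ _hdom hpre
  unfold Spec_count_Kprimes
  exact final_eq k start end_ hpre
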